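-- pv_equiv track=rewrite | github.com/orantrik/foliage_generator | foliage_generator_core.py | _category_for_patch
-- ===== SOURCE A (Python) =====
-- AREA_CATEGORY_THRESHOLDS_M2 = [
--     (5000, "LARGE_TREE"),   # large park / open square
--     (500,  "MEDIUM_TREE"),  # medium garden / large sports court
--     (50,   "SMALL_TREE"),   # small court / footpath
--     (0,    "SHRUB"),        # tiny planter / corner
-- ]
--
-- def _category_for_patch(patch_area_m2, available_categories):
--     """
--     Select the most appropriate foliage category for a surface patch of the
--     given area, according to the National Guide principle 'largest tree the
--     space can bear' (Section 4.1 Note d).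
--
--     Searches from the ideal category outward (both smaller and larger) until
--     an available category is found.  Returns None if nothing is available.
--     """
--     # Determine the ideal category by area threshold
--     ideal = "SHRUB"
--     for min_area, cat in AREA_CATEGORY_THRESHOLDS_M2:
--         if patch_area_m2 >= min_area:
--             ideal = cat
--             break
--
--     priority = ["LARGE_TREE", "MEDIUM_TREE", "SMALL_TREE", "SHRUB"]
--     ideal_idx = priority.index(ideal)
--
--     # Search: ideal first, then smaller (safer), then larger
--     search_order = [ideal_idx]
--     for delta in range(1, len(priority)):
--         if ideal_idx + delta < len(priority):
--             search_order.append(ideal_idx + delta)     # smaller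
--         if ideal_idx - delta >= 0:
--             search_order.append(ideal_idx - delta)     # larger
--
--     for idx in search_order:
--         cat = priority[idx]
--         if cat in available_categories:
--             return cat
--     return None
-- ===== SOURCE B (Python) =====
-- AREA_CATEGORY_THRESHOLDS_M2 = [
--     (5000, "LARGE_TREE"),
--     (500,  "MEDIUM_TREE"),
--     (50,   "SMALL_TREE"),
--     (0,    "SHRUB"),
-- ]
--
-- def _category_for_patch(patch_area_m2, available_categories):
--     # Same threshold scan for the ideal category, but the interleaved
--     # search-order construction is replaced by a sort of the indices by
--     # (distance from ideal, smaller-tree-first tiebreak), then one scan.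
--     ideal = "SHRUB"
--     for min_area, cat in AREA_CATEGORY_THRESHOLDS_M2:
--         if patch_area_m2 >= min_area:
--             ideal = cat
--             break
--     priority = ["LARGE_TREE", "MEDIUM_TREE", "SMALL_TREE", "SHRUB"]
--     ideal_idx = priority.index(ideal)
--     order = sorted(range(len(priority)),
--                    key=lambda idx: (abs(idx - ideal_idx), 0 if idx > ideal_idx else 1))
--     return next((priority[idx] for idx in order
--                  if priority[idx] in available_categories), None)
-- ===== Notes on version B (the rewrite author's own statement) =====
-- stated objective: simpler
-- what changed: Replaces the hand-interleaved +delta/-delta search-order construction with sorting the four priority indices by the key (distance from ideal, smaller-tree-first tiebreak) and returning the first sorted category present in available_categories via a single generator/next scan.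
import Mathlib
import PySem

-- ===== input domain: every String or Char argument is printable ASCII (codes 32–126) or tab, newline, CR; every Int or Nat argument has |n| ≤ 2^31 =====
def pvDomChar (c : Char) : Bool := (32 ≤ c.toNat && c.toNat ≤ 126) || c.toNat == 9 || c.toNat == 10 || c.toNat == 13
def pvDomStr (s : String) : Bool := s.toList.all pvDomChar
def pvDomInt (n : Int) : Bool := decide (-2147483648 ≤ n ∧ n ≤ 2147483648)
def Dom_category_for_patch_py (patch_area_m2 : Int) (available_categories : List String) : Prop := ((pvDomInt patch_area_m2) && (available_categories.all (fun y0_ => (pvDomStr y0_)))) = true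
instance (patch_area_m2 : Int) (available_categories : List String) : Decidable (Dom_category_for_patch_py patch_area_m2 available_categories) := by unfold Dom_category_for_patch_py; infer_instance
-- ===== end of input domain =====

-- B replaces A's interleaved search-order construction by a sort of the four
-- indices by (distance from ideal, smaller-tree-first tiebreak) and one scan
-- for the first available category (objective: simpler decomposition).

-- ===== PORT A =====
def pvThresholdsA : List (Int × String) :=
  [(5000, "LARGE_TREE"), (500, "MEDIUM_TREE"), (50, "SMALL_TREE"), (0, "SHRUB")]

def pvPriorityA : List String := ["LARGE_TREE", "MEDIUM_TREE", "SMALL_TREE", "SHRUB"]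

-- the 'for min_area, cat in …: if area >= min_area: ideal = cat; break' loop
def pvIdealLoopA : Int → List (Int × String) → String → String
  | _, [], acc => acc
  | a, (m, c) :: rest, acc => if a ≥ m then c else pvIdealLoopA a rest acc

-- the final 'for idx in search_order: …' loop (pyGet? none = IndexError, unreachable)
def pvSearchLoopA : List Int → List String → Option String
  | [], _ => none
  | idx :: rest, avail =>
      match PySem.List.pyGet? pvPriorityA idx with
      | some cat => if avail.contains cat then some cat else pvSearchLoopA rest avail
      | none => none

def category_for_patch_py (patch_area_m2 : Int) (available_categories : List String) : Option String :=
  let ideal := pvIdealLoopA patch_area_m2 pvThresholdsA "SHRUB"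
  -- priority.index(ideal); ideal is always in the list, so .getD 0 is unreachable
  let ideal_idx : Int := ((PySem.List.index? pvPriorityA ideal).getD 0 : Nat)
  let search_order :=
    (PySem.List.pyRange 1 (pvPriorityA.length) 1).foldl
      (fun so delta =>
        let so := if ideal_idx + delta < (pvPriorityA.length : Int) then so ++ [ideal_idx + delta] else so
        if ideal_idx - delta ≥ 0 then so ++ [ideal_idx - delta] else so)
      [ideal_idx]
  pvSearchLoopA search_order available_categories

-- ===== PORT B =====
def pvThresholdsB : List (Int × String) :=
  [(5000, "LARGE_TREE"), (500, "MEDIUM_TREE"), (50, "SMALL_TREE"), (0, "SHRUB")]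

def pvPriorityB : List String := ["LARGE_TREE", "MEDIUM_TREE", "SMALL_TREE", "SHRUB"]

def pvIdealLoopB : Int → List (Int × String) → String → String
  | _, [], acc => acc
  | a, (m, c) :: rest, acc => if a ≥ m then c else pvIdealLoopB a rest acc

def category_for_patch_py_alt (patch_area_m2 : Int) (available_categories : List String) : Option String :=
  let ideal := pvIdealLoopB patch_area_m2 pvThresholdsB "SHRUB"
  let ideal_idx : Int := ((PySem.List.index? pvPriorityB ideal).getD 0 : Nat)
  let order := PySem.List.sorted2 (PySem.List.pyRange 0 (pvPriorityB.length) 1)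
      (fun idx => |idx - ideal_idx|) (fun idx => if idx > ideal_idx then (0 : Int) else 1)
  -- next((priority[idx] for idx in order if priority[idx] in available), None)
  match order.find? (fun idx =>
      ((PySem.List.pyGet? pvPriorityB idx).map available_categories.contains).getD false) with
  | some idx => PySem.List.pyGet? pvPriorityB idx
  | none => none

-- ===== PRECONDITION & SPEC =====
def Spec_category_for_patch_py (patch_area_m2 : Int) (available_categories : List String) (out : Option String) : Prop := out = category_for_patch_py_alt patch_area_m2 available_categories
instance (patch_area_m2 : Int) (available_categories : List String) (out : Option String) : Decidable (Spec_category_for_patch_py patch_area_m2 available_categories out) := by unfold Spec_category_for_patch_py; infer_instance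

-- ===== CLAIM (what is proved, stated in full; the proofs are below) =====
def Claim_equal_category_for_patch_py : Prop := ∀ (patch_area_m2 : Int) (available_categories : List String), Dom_category_for_patch_py patch_area_m2 available_categories → Spec_category_for_patch_py patch_area_m2 available_categories (category_for_patch_py patch_area_m2 available_categories)

-- ===== LEMMAS AND PROOFS =====

set_option maxHeartbeats 1000000 in
theorem pv_case1 (a : Int) (avail : List String) (h1 : a ≥ 5000) :
    category_for_patch_py a avail = category_for_patch_py_alt a avail := by
  have hidA : pvIdealLoopA a pvThresholdsA "SHRUB" = "LARGE_TREE" := by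
    simp only [pvIdealLoopA, pvThresholdsA]
    rw [if_pos (by omega)]
  have hidB : pvIdealLoopB a pvThresholdsB "SHRUB" = "LARGE_TREE" := by
    simp only [pvIdealLoopB, pvThresholdsB]
    rw [if_pos (by omega)]
  simp [category_for_patch_py, category_for_patch_py_alt, hidA, hidB,
    pvPriorityA, pvPriorityB, pvSearchLoopA,
    PySem.List.pyRange, PySem.List.sorted2, PySem.List.insertBy, PySem.List.index?,
    PySem.List.pyGet?, PySem.List.pyIdx?, List.find?, List.range_succ, List.idxOf?,
    List.findIdx?_cons, List.findIdx?_nil]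
  split_ifs <;> simp_all

set_option maxHeartbeats 1000000 in
theorem pv_case2 (a : Int) (avail : List String) (h1 : a < 5000) (h2 : a ≥ 500) :
    category_for_patch_py a avail = category_for_patch_py_alt a avail := by
  have hidA : pvIdealLoopA a pvThresholdsA "SHRUB" = "MEDIUM_TREE" := by
    simp only [pvIdealLoopA, pvThresholdsA]
    rw [if_neg (by omega), if_pos (by omega)]
  have hidB : pvIdealLoopB a pvThresholdsB "SHRUB" = "MEDIUM_TREE" := by
    simp only [pvIdealLoopB, pvThresholdsB]
    rw [if_neg (by omega), if_pos (by omega)]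
  simp [category_for_patch_py, category_for_patch_py_alt, hidA, hidB,
    pvPriorityA, pvPriorityB, pvSearchLoopA,
    PySem.List.pyRange, PySem.List.sorted2, PySem.List.insertBy, PySem.List.index?,
    PySem.List.pyGet?, PySem.List.pyIdx?, List.find?, List.range_succ, List.idxOf?,
    List.findIdx?_cons, List.findIdx?_nil]
  split_ifs <;> simp_all

set_option maxHeartbeats 1000000 in
theorem pv_case3 (a : Int) (avail : List String) (h1 : a < 500) (h2 : a ≥ 50) :
    category_for_patch_py a avail = category_for_patch_py_alt a avail := by
  have hidA : pvIdealLoopA a pvThresholdsA "SHRUB" = "SMALL_TREE" := by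
    simp only [pvIdealLoopA, pvThresholdsA]
    rw [if_neg (by omega), if_neg (by omega), if_pos (by omega)]
  have hidB : pvIdealLoopB a pvThresholdsB "SHRUB" = "SMALL_TREE" := by
    simp only [pvIdealLoopB, pvThresholdsB]
    rw [if_neg (by omega), if_neg (by omega), if_pos (by omega)]
  simp [category_for_patch_py, category_for_patch_py_alt, hidA, hidB,
    pvPriorityA, pvPriorityB, pvSearchLoopA,
    PySem.List.pyRange, PySem.List.sorted2, PySem.List.insertBy, PySem.List.index?,
    PySem.List.pyGet?, PySem.List.pyIdx?, List.find?, List.range_succ, List.idxOf?,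
    List.findIdx?_cons, List.findIdx?_nil]
  split_ifs <;> simp_all

set_option maxHeartbeats 1000000 in
theorem pv_case4 (a : Int) (avail : List String) (h1 : a < 50) (h2 : a ≥ 0) :
    category_for_patch_py a avail = category_for_patch_py_alt a avail := by
  have hidA : pvIdealLoopA a pvThresholdsA "SHRUB" = "SHRUB" := by
    simp only [pvIdealLoopA, pvThresholdsA]
    rw [if_neg (by omega), if_neg (by omega), if_neg (by omega), if_pos (by omega)]
  have hidB : pvIdealLoopB a pvThresholdsB "SHRUB" = "SHRUB" := by
    simp only [pvIdealLoopB, pvThresholdsB]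
    rw [if_neg (by omega), if_neg (by omega), if_neg (by omega), if_pos (by omega)]
  simp [category_for_patch_py, category_for_patch_py_alt, hidA, hidB,
    pvPriorityA, pvPriorityB, pvSearchLoopA,
    PySem.List.pyRange, PySem.List.sorted2, PySem.List.insertBy, PySem.List.index?,
    PySem.List.pyGet?, PySem.List.pyIdx?, List.find?, List.range_succ, List.idxOf?,
    List.findIdx?_cons, List.findIdx?_nil]
  split_ifs <;> simp_all

set_option maxHeartbeats 1000000 in
theorem pv_case5 (a : Int) (avail : List String) (h1 : a < 0) :
    category_for_patch_py a avail = category_for_patch_py_alt a avail := by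
  have hidA : pvIdealLoopA a pvThresholdsA "SHRUB" = "SHRUB" := by
    simp only [pvIdealLoopA, pvThresholdsA]
    rw [if_neg (by omega), if_neg (by omega), if_neg (by omega), if_neg (by omega)]
  have hidB : pvIdealLoopB a pvThresholdsB "SHRUB" = "SHRUB" := by
    simp only [pvIdealLoopB, pvThresholdsB]
    rw [if_neg (by omega), if_neg (by omega), if_neg (by omega), if_neg (by omega)]
  simp [category_for_patch_py, category_for_patch_py_alt, hidA, hidB,
    pvPriorityA, pvPriorityB, pvSearchLoopA,
    PySem.List.pyRange, PySem.List.sorted2, PySem.List.insertBy, PySem.List.index?,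
    PySem.List.pyGet?, PySem.List.pyIdx?, List.find?, List.range_succ, List.idxOf?,
    List.findIdx?_cons, List.findIdx?_nil]
  split_ifs <;> simp_all

-- ===== VERDICT (by name: the statement is the Claim_ definition above) =====
theorem category_for_patch_py_spec : Claim_equal_category_for_patch_py := by
  intro a avail _
  unfold Spec_category_for_patch_py
  by_cases h1 : a ≥ 5000
  · exact pv_case1 a avail h1
  · by_cases h2 : a ≥ 500
    · exact pv_case2 a avail (by omega) h2
    · by_cases h3 : a ≥ 50
      · exact pv_case3 a avail (by omega) h3
      · by_cases h4 : a ≥ 0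
        · exact pv_case4 a avail (by omega) h4
        · exact pv_case5 a avail (by omega)
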